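-- pv_equiv track=rewrite | github.com/Jao20022/Opdrachten | Blok C/Structured Programming/Summatieve Opdrachten/1 Mastermind/Mastermind.py | FilterMatrix
-- ===== SOURCE A (Python) =====
-- def FilterMatrix(PossibleGuesses, Matrix, Filter = False):
--     """
--     Takes the matrix and returns a list of guesses with the lowest high ammount of guesses.
--
--
--     Args:
--         PossibleGuesses: List. Possible Guesses
--         Matrix: List. All possible scores for all possible guesses.
--         Filter: Boolean.
--
--     Returns: List. Optimal guesses.
--     """
--     FilteredMatrix = []
--     PossibleScores = GeneratePossibleScores(len(PossibleGuesses[0]), Filter)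
--     for i in range(len(Matrix)):
--         FilteredMatrix.append([])
--         for Score in PossibleScores:
--             FilteredMatrix[i].append(Matrix[i].count(Score))
--         FilteredMatrix[i] = max(FilteredMatrix[i])
--     Indexes = GetAllIndex(FilteredMatrix, min(FilteredMatrix))
--     Guesses = []
--     for Index in Indexes:
--         Guesses.append(PossibleGuesses[Index])
--     return Guesses
--
-- def GeneratePossibleScores(CodeLength, Filter):
--     """
--     Generates a list of all possible Scores
--     if Filter, only scores that do not contain a 0 or equals the codelength are returned.
--     Args:
--         CodeLength: Integer. Length of the code
--         Filter: Boolean. Decides if the filter is applied.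
--
--     Returns: List. Of all possible scores
--     """
--     PossibleScores = []
--     for i in range(CodeLength + 1):
--         for x in range(CodeLength + 1):
--             if Filter:
--                 if (i != 0 or x != 0) or i + x == CodeLength:
--                     PossibleScores.append([i,x])
--             else:
--                 if not i + x > CodeLength:
--                     PossibleScores.append([i, x])
--     return PossibleScores
--
-- def GetAllIndex(List, Value):
--     """
--     Gets all the indexes from a list with the given value.
--
--     Args:
--         List: List. That gets searched
--         Value: Item for which the indexes get searched.
--
--     Returns: List. Of all the indexes
--     """
--     Indexes = []
--     for Index in range(len(List)):
--         if List[Index] == Value: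
--             Indexes.append(Index)
--     return Indexes
-- ===== SOURCE B (Python) =====
-- def FilterMatrix(PossibleGuesses, Matrix, Filter=False):
--     """Different decomposition: each row's worst-case is found by successively
--     stripping whole equivalence classes from the (legal-score-filtered) row --
--     never scanning the row once per candidate score and never counting into a
--     table -- and the winners are picked by a zip comprehension against min()."""
--     n = len(PossibleGuesses[0])
--     if Filter:
--         allowed = [[i, x] for i in range(n + 1) for x in range(n + 1)
--                    if (i, x) != (0, 0) or n == 0]
--     else:
--         allowed = [[i, x] for i in range(n + 1) for x in range(n + 1) if i + x <= n]
--
--     def worst(row):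
--         kept = [s for s in row if s in allowed]
--         w = 0
--         while kept:
--             rest = [t for t in kept if t != kept[0]]
--             c = len(kept) - len(rest)
--             if c > w:
--                 w = c
--             kept = rest
--         return w
--
--     worsts = [worst(row) for row in Matrix]
--     m = min(worsts)
--     return [g for w, g in zip(worsts, PossibleGuesses) if w == m]
-- ===== Notes on version B (the rewrite author's own statement) =====
-- stated objective: alternative
-- what changed: Per-row worst-case is computed by repeatedly stripping the whole equivalence class of the row's first element from the legal-score-filtered row (max class size found by partitioning, never by counting each candidate score against the row or tallying into a table), and winners are selected by a zip comprehension against min(worsts) instead of A's index-collection pass plus gather loop.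
-- outside the precondition, e.g. on FilterMatrix([[1]], [], False): A raises ValueError, B raises ValueError; on FilterMatrix([], [[[0, 0]]], False): A raises IndexError, B raises IndexError; on FilterMatrix([[1]], [[[0, 0]], [[0, 0], [0, 0]]], False): A returns [[1]], B returns [[1]]
import Mathlib
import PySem

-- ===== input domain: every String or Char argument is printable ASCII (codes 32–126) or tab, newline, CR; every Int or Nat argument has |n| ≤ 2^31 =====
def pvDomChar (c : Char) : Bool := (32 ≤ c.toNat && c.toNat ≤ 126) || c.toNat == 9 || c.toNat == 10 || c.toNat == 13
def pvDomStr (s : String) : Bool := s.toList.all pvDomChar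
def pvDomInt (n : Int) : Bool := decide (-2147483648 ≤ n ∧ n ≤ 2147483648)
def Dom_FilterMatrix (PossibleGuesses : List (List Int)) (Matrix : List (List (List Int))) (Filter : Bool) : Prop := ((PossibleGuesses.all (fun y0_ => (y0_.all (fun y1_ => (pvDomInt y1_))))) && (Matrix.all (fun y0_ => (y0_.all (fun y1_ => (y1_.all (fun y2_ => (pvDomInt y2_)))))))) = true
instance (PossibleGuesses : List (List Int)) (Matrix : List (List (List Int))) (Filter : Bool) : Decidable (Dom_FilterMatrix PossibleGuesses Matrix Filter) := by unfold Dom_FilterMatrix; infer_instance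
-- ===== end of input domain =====

-- B finds each row's worst-case by successively stripping whole equivalence classes from the
-- legal-score-filtered row (no per-candidate row scan, no count table) and picks the winners
-- by a zip comprehension against min(worsts), instead of A's build-matrix / min() /
-- index-collection / gather pipeline.

-- ===== PORT A =====
def GeneratePossibleScores (CodeLength : Int) (Filter : Bool) : List (List Int) :=
  (PySem.List.pyRange 0 (CodeLength + 1) 1).foldl (fun ps i =>
    (PySem.List.pyRange 0 (CodeLength + 1) 1).foldl (fun ps x =>
      if Filter then
        (if (i ≠ 0 ∨ x ≠ 0) ∨ i + x = CodeLength then ps ++ [[i, x]] else ps)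
      else
        (if ¬ i + x > CodeLength then ps ++ [[i, x]] else ps)) ps) []

def GetAllIndex (L : List Int) (Value : Int) : List Int :=
  (PySem.List.pyRange 0 (PySem.List.len L) 1).foldl (fun idxs Index =>
    if PySem.List.pyGetD L Index 0 = Value then idxs ++ [Index] else idxs) []

def FilterMatrix (PossibleGuesses : List (List Int)) (Matrix : List (List (List Int))) (Filter : Bool) : List (List Int) :=
  let PossibleScores := GeneratePossibleScores (PySem.List.len (PySem.List.pyGetD PossibleGuesses 0 [])) Filter
  -- each loop iteration appends [], fills it with the row's counts, then replaces it by their max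
  let FilteredMatrix : List Int :=
    (PySem.List.pyRange 0 (PySem.List.len Matrix) 1).foldl (fun fm i =>
      let counts := PossibleScores.foldl (fun cs Score =>
        cs ++ [PySem.List.count (PySem.List.pyGetD Matrix i []) Score]) []
      fm ++ [(↑((PySem.List.max? counts (fun v => v)).getD 0) : Int)]) []
  let m := (PySem.List.min? FilteredMatrix (fun v => v)).getD 0
  (GetAllIndex FilteredMatrix m).foldl (fun gs Index =>
    gs ++ [PySem.List.pyGetD PossibleGuesses Index []]) []

-- ===== PORT B =====
def pvAllowed (n : Int) (Filter : Bool) : List (List Int) :=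
  if Filter then
    (PySem.List.pyRange 0 (n + 1) 1).flatMap (fun i =>
      ((PySem.List.pyRange 0 (n + 1) 1).filter (fun x =>
        decide (¬ (i = 0 ∧ x = 0) ∨ n = 0))).map (fun x => [i, x]))
  else
    (PySem.List.pyRange 0 (n + 1) 1).flatMap (fun i =>
      ((PySem.List.pyRange 0 (n + 1) 1).filter (fun x =>
        decide (i + x ≤ n))).map (fun x => [i, x]))

-- Source B's while loop: strip the first element's whole equivalence class, remember its size
def pvWorstLoop (kept : List (List Int)) (w : Int) : Int :=
  match kept with
  | [] => w
  | s :: t =>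
    let rest := (s :: t).filter (fun u => decide (u ≠ s))
    let c : Int := PySem.List.len (s :: t) - PySem.List.len rest
    pvWorstLoop rest (if c > w then c else w)
termination_by kept.length
decreasing_by
  have h : List.filter (fun u => decide (u ≠ s)) (s :: t)
      = List.filter (fun u => decide (u ≠ s)) t := by
    simp
  simp only [h, List.length_cons]
  have := List.length_filter_le (fun u => decide (u ≠ s)) t
  omega

def FilterMatrix_alt (PossibleGuesses : List (List Int)) (Matrix : List (List (List Int))) (Filter : Bool) : List (List Int) :=
  let n := PySem.List.len (PySem.List.pyGetD PossibleGuesses 0 [])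
  let allowed := pvAllowed n Filter
  let worsts := Matrix.map (fun row =>
    pvWorstLoop (row.filter (fun s => decide (s ∈ allowed))) 0)
  let m := (PySem.List.min? worsts (fun v => v)).getD 0
  ((worsts.zip PossibleGuesses).filter (fun p => decide (p.1 = m))).map (fun p => p.2)

-- ===== PRECONDITION & SPEC =====
-- Pre_ excludes: empty PossibleGuesses (A raises IndexError) and empty Matrix (A raises
-- ValueError from min([])); it also excludes Matrix longer than PossibleGuesses, where whether
-- A returns at all (or raises IndexError) depends on which rows attain the minimum.
def Pre_FilterMatrix (PossibleGuesses : List (List Int)) (Matrix : List (List (List Int))) (Filter : Bool) : Prop :=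
  PossibleGuesses ≠ [] ∧ Matrix ≠ [] ∧ Matrix.length ≤ PossibleGuesses.length
instance (PossibleGuesses : List (List Int)) (Matrix : List (List (List Int))) (Filter : Bool) : Decidable (Pre_FilterMatrix PossibleGuesses Matrix Filter) := by unfold Pre_FilterMatrix; infer_instance

def pvWitness_FilterMatrix : List (List Int) × List (List (List Int)) × Bool :=
  ([[1, 0]], [[[0, 0], [1, 1]]], false)

def Spec_FilterMatrix (PossibleGuesses : List (List Int)) (Matrix : List (List (List Int))) (Filter : Bool) (out : List (List Int)) : Prop := out = FilterMatrix_alt PossibleGuesses Matrix Filter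
instance (PossibleGuesses : List (List Int)) (Matrix : List (List (List Int))) (Filter : Bool) (out : List (List Int)) : Decidable (Spec_FilterMatrix PossibleGuesses Matrix Filter out) := by unfold Spec_FilterMatrix; infer_instance

-- ===== CLAIM (what is proved, stated in full; the proofs are below) =====
def Claim_equal_FilterMatrix : Prop := ∀ (PossibleGuesses : List (List Int)) (Matrix : List (List (List Int))) (Filter : Bool), Dom_FilterMatrix PossibleGuesses Matrix Filter → Pre_FilterMatrix PossibleGuesses Matrix Filter → Spec_FilterMatrix PossibleGuesses Matrix Filter (FilterMatrix PossibleGuesses Matrix Filter)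

-- ===== LEMMAS AND PROOFS =====

-- the same score pairs are generated (only membership is needed downstream)
lemma pv_mem_gen_iff (n : Int) (F : Bool) (s : List Int) :
    s ∈ GeneratePossibleScores n F ↔ s ∈ pvAllowed n F := by
  cases F <;>
    simp only [GeneratePossibleScores, pvAllowed, Bool.false_eq_true, if_false, if_true,
      PySem.List.foldl_append_ite, PySem.List.foldl_append_eq_flatMap, List.nil_append,
      List.mem_flatMap, List.mem_map, List.mem_filter, PySem.List.mem_pyRange_one,
      decide_eq_true_eq] <;>
    constructor <;>
    rintro ⟨i, hi, x, ⟨hx, hc⟩, rfl⟩ <;>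
    exact ⟨i, hi, x, ⟨hx, by omega⟩, rfl⟩

-- A's per-row value, after collapsing its count-append loop into a map
def pvRowA (PS : List (List Int)) (row : List (List Int)) : Int :=
  (↑((PySem.List.max? (PS.map (fun Score => PySem.List.count row Score)) (fun v => v)).getD 0) : Int)

lemma pv_FM_collapse (PS : List (List Int)) (M : List (List (List Int))) :
    (PySem.List.pyRange 0 (PySem.List.len M) 1).foldl (fun fm i =>
      let counts := PS.foldl (fun cs Score =>
        cs ++ [PySem.List.count (PySem.List.pyGetD M i []) Score]) []
      fm ++ [(↑((PySem.List.max? counts (fun v => v)).getD 0) : Int)]) []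
    = M.map (pvRowA PS) := by
  simp only [PySem.List.foldl_append_singleton_eq_map, List.nil_append]
  conv_rhs => rw [← PySem.List.map_pyGetD_pyRange_zero M ([] : List (List Int)), List.map_map]
  rfl

-- B's per-row strip value, expressed as the max class size of the kept list
def pvMC (fr : List (List Int)) : Int :=
  ((PySem.Set.ofList fr).map (fun k => ((List.count k fr : Nat) : Int))).foldl
    (fun a c => max a c) 0

lemma pv_maxD_nat (l : List Nat) : ((PySem.List.max? l (fun v => v)).getD 0) = l.foldl max 0 := by
  cases l with
  | nil => rfl
  | cons c t =>
    rw [PySem.List.max?_id_cons, Option.getD_some, List.foldl_cons, Nat.max_comm, Nat.max_zero]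

lemma pv_cast_foldl_max (l : List Nat) (a : Nat) :
    ((l.foldl max a : Nat) : Int) = l.foldl (fun (x : Int) (c : Nat) => max x (c : Int)) (a : Int) := by
  induction l generalizing a with
  | nil => rfl
  | cons c t ih => simp only [List.foldl_cons, ih, Nat.cast_max]

lemma pv_foldl_max_le (l : List Nat) (z : Nat) (h : ∀ y ∈ l, y ≤ z) : l.foldl max 0 ≤ z := by
  rcases PySem.List.foldl_max_mem l 0 with h0 | hm
  · omega
  · exact h _ hm

lemma pv_foldl_max_le_int (l : List Int) (z : Int) (h0 : 0 ≤ z) (h : ∀ y ∈ l, y ≤ z) :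
    l.foldl max 0 ≤ z := by
  rcases PySem.List.foldl_max_mem l 0 with hb | hm
  · omega
  · exact h _ hm

lemma pv_le_pvMC (fr : List (List Int)) (k : List Int) (hk : k ∈ PySem.Set.ofList fr) :
    ((List.count k fr : Nat) : Int) ≤ pvMC fr := by
  have h := (PySem.List.le_foldl_max_int (PySem.Set.ofList fr)
    (fun k => ((List.count k fr : Nat) : Int)) 0).2 k hk
  simpa [pvMC, List.foldl_map] using h

lemma pv_pvMC_nonneg (fr : List (List Int)) : 0 ≤ pvMC fr := by
  have h := (PySem.List.le_foldl_max_int (PySem.Set.ofList fr)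
    (fun k => ((List.count k fr : Nat) : Int)) 0).1
  simpa [pvMC, List.foldl_map] using h

-- A's max over all candidate scores' counts equals the max class size of the kept list
lemma pv_rowA_eq_pvMC (PS : List (List Int)) (allowed : List (List Int)) (row : List (List Int))
    (hmem : ∀ s, s ∈ allowed ↔ s ∈ PS) :
    pvRowA PS row = pvMC (row.filter (fun s => decide (s ∈ allowed))) := by
  simp only [pvRowA, pvMC]
  set fr := row.filter (fun s => decide (s ∈ allowed)) with hfr
  have hB : ((List.foldl max 0 ((PySem.Set.ofList fr).map (fun k => List.count k fr)) : Nat) : Int)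
      = ((PySem.Set.ofList fr).map (fun k => ((List.count k fr : Nat) : Int))).foldl
          (fun a c => max a c) 0 := by
    rw [pv_cast_foldl_max, List.foldl_map, List.foldl_map]
    simp
  rw [← hB]
  simp only [PySem.List.count_eq, pv_maxD_nat]
  congr 1
  have hcnt : ∀ s ∈ fr, List.count s fr = List.count s row := by
    intro s hs
    have hp := (List.mem_filter.mp (hfr ▸ hs)).2
    rw [hfr]
    exact List.count_filter hp
  apply Nat.le_antisymm
  · apply pv_foldl_max_le
    intro y hy
    rcases List.mem_map.mp hy with ⟨s, hs, rfl⟩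
    by_cases hz : List.count s row = 0
    · omega
    · have hrow : s ∈ row := List.count_pos_iff.mp (Nat.pos_of_ne_zero hz)
      have hfr' : s ∈ fr := by
        rw [hfr, List.mem_filter]
        exact ⟨hrow, decide_eq_true ((hmem s).mpr hs)⟩
      have hm : List.count s fr ∈ (PySem.Set.ofList fr).map (fun k => List.count k fr) :=
        List.mem_map.mpr ⟨s, (PySem.Set.mem_ofList fr s).mpr hfr', rfl⟩
      calc List.count s row = List.count s fr := (hcnt s hfr').symm
        _ ≤ _ := (PySem.List.le_foldl_max _ _).2 _ hm
  · apply pv_foldl_max_le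
    intro y hy
    rcases List.mem_map.mp hy with ⟨d, hd, rfl⟩
    have hdfr : d ∈ fr := (PySem.Set.mem_ofList fr d).mp hd
    have hdfr2 : d ∈ row.filter (fun s => decide (s ∈ allowed)) := by rwa [← hfr]
    have hdPS : d ∈ PS := (hmem d).mp (of_decide_eq_true (List.mem_filter.mp hdfr2).2)
    rw [hcnt d hdfr]
    exact (PySem.List.le_foldl_max _ _).2 _ (List.mem_map.mpr ⟨d, hdPS, rfl⟩)

-- stripping s from the list splits the max class size into max (count s) (rest's max)
lemma pv_pvMC_strip (s : List Int) (t : List (List Int)) :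
    pvMC (s :: t)
      = max ((List.count s (s :: t) : Nat) : Int)
          (pvMC ((s :: t).filter (fun u => decide (u ≠ s)))) := by
  set L := s :: t with hL
  set rest := L.filter (fun u => decide (u ≠ s)) with hrest
  have hmemrest : ∀ u, u ∈ rest ↔ u ∈ L ∧ u ≠ s := by
    intro u
    rw [hrest, List.mem_filter]
    simp
  have hcnt : ∀ u, u ≠ s → List.count u rest = List.count u L := by
    intro u hu
    rw [hrest]
    exact List.count_filter (by simpa using hu)
  have hc0 : (0 : Int) ≤ ((List.count s L : Nat) : Int) := by positivity
  apply le_antisymm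
  · apply pv_foldl_max_le_int _ _ (le_max_of_le_left hc0)
    intro y hy
    rcases List.mem_map.mp hy with ⟨k, hk, rfl⟩
    have hkL : k ∈ L := (PySem.Set.mem_ofList L k).mp hk
    by_cases hks : k = s
    · subst hks; exact le_max_left _ _
    · refine le_max_of_le_right ?_
      have hkrest : k ∈ rest := (hmemrest k).mpr ⟨hkL, hks⟩
      rw [← hcnt k hks]
      exact pv_le_pvMC rest k ((PySem.Set.mem_ofList rest k).mpr hkrest)
  · apply max_le
    · exact pv_le_pvMC L s
        ((PySem.Set.mem_ofList L s).mpr (by rw [hL]; exact List.mem_cons_self ..))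
    · apply pv_foldl_max_le_int _ _ (pv_pvMC_nonneg L)
      intro y hy
      rcases List.mem_map.mp hy with ⟨k, hk, rfl⟩
      have hkr : k ∈ rest := (PySem.Set.mem_ofList rest k).mp hk
      have hks : k ≠ s := ((hmemrest k).mp hkr).2
      rw [hcnt k hks]
      exact pv_le_pvMC L k ((PySem.Set.mem_ofList L k).mpr ((hmemrest k).mp hkr).1)

-- the stripped class's size is the first element's count
lemma pv_strip_count (s : List Int) (t : List (List Int)) :
    (PySem.List.len (s :: t) : Int) - PySem.List.len ((s :: t).filter (fun u => decide (u ≠ s)))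
      = ((List.count s (s :: t) : Nat) : Int) := by
  simp only [PySem.List.len_eq]
  rw [← List.countP_eq_length_filter]
  have h : (s :: t).countP (fun u => decide (u ≠ s)) + List.count s (s :: t)
      = (s :: t).length := by
    rw [List.count_eq_countP,
      List.length_eq_countP_add_countP (p := fun u => decide (u ≠ s)) (l := s :: t)]
    congr 1
    refine List.countP_congr ?_
    intro u _
    simp [Bool.beq_eq_decide_eq]
  omega

-- Source B's while loop computes max w (max class size)
lemma pv_worstLoop_eq (kept : List (List Int)) (w : Int) (hw : 0 ≤ w) :
    pvWorstLoop kept w = max w (pvMC kept) := by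
  induction hn : kept.length using Nat.strong_induction_on generalizing kept w with
  | _ n ih =>
    match kept with
    | [] =>
      have h0 : pvMC ([] : List (List Int)) = 0 := rfl
      rw [h0, pvWorstLoop]
      omega
    | s :: t =>
      rw [pvWorstLoop]
      set rest := (s :: t).filter (fun u => decide (u ≠ s)) with hrest
      set c : Int := PySem.List.len (s :: t) - PySem.List.len rest with hc
      have hcval : c = ((List.count s (s :: t) : Nat) : Int) := pv_strip_count s t
      have hlt : rest.length < n := by
        have hr2 : rest = t.filter (fun u => decide (u ≠ s)) := by
          rw [hrest, List.filter_cons]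
          simp
        rw [← hn, hr2, List.length_cons]
        have := List.length_filter_le (fun u => decide (u ≠ s)) t
        omega
      have hw' : 0 ≤ (if c > w then c else w) := by
        split_ifs <;> omega
      rw [ih rest.length hlt rest _ hw' rfl, pv_pvMC_strip s t, ← hrest, ← hcval]
      have : (if c > w then c else w) = max w c := by rw [max_def]; split_ifs <;> omega
      rw [this, max_assoc]

-- A's gather over collected indexes is the zip-filter comprehension
lemma pv_gather_nat (m : Int) (ws : List Int) (gs : List (List Int))
    (h : ws.length ≤ gs.length) :
    ((List.range ws.length).filter (fun k => decide (ws.getD k 0 = m))).map (fun k => gs.getD k []) =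
      ((ws.zip gs).filter (fun p => decide (p.1 = m))).map Prod.snd := by
  induction ws generalizing gs with
  | nil => simp
  | cons w wt ih =>
    cases gs with
    | nil => simp at h
    | cons g gt =>
      have h' : wt.length ≤ gt.length := by simpa using h
      have hsucc : ((List.map Nat.succ (List.range wt.length)).filter
            (fun k => decide ((w :: wt).getD k 0 = m))).map (fun k => (g :: gt).getD k []) =
          ((List.range wt.length).filter (fun k => decide (wt.getD k 0 = m))).map
            (fun k => gt.getD k []) := by
        rw [List.filter_map, List.map_map]
        simp only [Function.comp_def, Nat.succ_eq_add_one, List.getD_cons_succ]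
      rw [List.length_cons, List.range_succ_eq_map, List.filter_cons,
        apply_ite (List.map (fun k => (g :: gt).getD k [])), List.map_cons, hsucc, ih gt h',
        List.zip_cons_cons, List.filter_cons,
        apply_ite (List.map (Prod.snd (α := Int) (β := List Int))), List.map_cons]
      simp only [List.getD_cons_zero]

lemma pv_gather_eq (ws : List Int) (gs : List (List Int)) (m : Int)
    (h : ws.length ≤ gs.length) :
    (GetAllIndex ws m).foldl (fun acc i => acc ++ [PySem.List.pyGetD gs i []]) []
      = ((ws.zip gs).filter (fun p => decide (p.1 = m))).map Prod.snd := by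
  unfold GetAllIndex
  rw [PySem.List.foldl_append_ite_eq_filter (p := fun Index => PySem.List.pyGetD ws Index 0 = m),
    PySem.List.foldl_append_singleton_eq_map, PySem.List.len_eq, PySem.List.pyRange_zero_nat]
  simp only [List.nil_append, List.filter_map, List.map_map]
  have h2 := pv_gather_nat m ws gs h
  simpa [Function.comp_def] using h2

-- ===== VERDICT (by name: the statement is the Claim_ definition above) =====
theorem FilterMatrix_spec : Claim_equal_FilterMatrix := by
  intro PG M F _ hpre
  obtain ⟨hPG, hM, hlen⟩ := hpre
  simp only [Spec_FilterMatrix, FilterMatrix, FilterMatrix_alt]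
  set n := PySem.List.len (PySem.List.pyGetD PG 0 []) with hn
  set PS := GeneratePossibleScores n F with hPSdef
  set allowed := pvAllowed n F with hallowed
  have hmem : ∀ s, s ∈ allowed ↔ s ∈ PS := by
    intro s
    rw [hallowed, hPSdef, pv_mem_gen_iff]
  have hrowmap :
      M.map (fun row => pvWorstLoop (row.filter (fun s => decide (s ∈ allowed))) 0)
        = M.map (pvRowA PS) := by
    refine List.map_congr_left (fun r _ => ?_)
    rw [pv_worstLoop_eq _ _ le_rfl, pv_rowA_eq_pvMC PS allowed r hmem]
    exact max_eq_right (pv_pvMC_nonneg _)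
  rw [pv_FM_collapse PS M, hrowmap,
    pv_gather_eq _ _ _ (by simpa using hlen)]
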